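-- pv_equiv track=rewrite | github.com/kkobanenko/Clin-rec | app/ui/app.py | build_bulk_approve_evidence_ids
-- ===== SOURCE A (Python) =====
-- def build_bulk_approve_evidence_ids(manual_ids: str, selected_ids: list[int]) -> list[int]:
--     evidence_ids: list[int] = []
--     seen_ids: set[int] = set()
--     for raw_value in manual_ids.split(","):
--         stripped_value = raw_value.strip()
--         if not stripped_value:
--             continue
--         parsed_id = int(stripped_value)
--         if parsed_id in seen_ids:
--             continue
--         seen_ids.add(parsed_id)
--         evidence_ids.append(parsed_id)
--     for selected_id in selected_ids:
--         if selected_id in seen_ids: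
--             continue
--         seen_ids.add(selected_id)
--         evidence_ids.append(selected_id)
--     return evidence_ids
-- ===== SOURCE B (Python) =====
-- def build_bulk_approve_evidence_ids(manual_ids: str, selected_ids: list[int]) -> list[int]:
--     combined = [int(t) for t in map(str.strip, manual_ids.split(",")) if t] + list(selected_ids)
--     # Walk the combined sequence backwards with plain overwriting writes: the
--     # last write for each value is its FIRST occurrence index; no membership
--     # test or seen-set is ever consulted.
--     first_pos = {}
--     for i, x in reversed(list(enumerate(combined))):
--         first_pos[x] = i
--     # Emit the distinct values ordered by their first-occurrence position.
--     return [x for x, _ in sorted(first_pos.items(), key=lambda item: item[1])]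
-- ===== Notes on version B (the rewrite author's own statement) =====
-- stated objective: alternative
-- what changed: Replaces A's streaming seen-set dedup by a different algorithm: after parsing and concatenating, a backwards overwrite pass over enumerate(combined) records each value's first-occurrence index in a dict (no membership test anywhere), and the result is the distinct values sorted by those first positions.
import Mathlib
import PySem

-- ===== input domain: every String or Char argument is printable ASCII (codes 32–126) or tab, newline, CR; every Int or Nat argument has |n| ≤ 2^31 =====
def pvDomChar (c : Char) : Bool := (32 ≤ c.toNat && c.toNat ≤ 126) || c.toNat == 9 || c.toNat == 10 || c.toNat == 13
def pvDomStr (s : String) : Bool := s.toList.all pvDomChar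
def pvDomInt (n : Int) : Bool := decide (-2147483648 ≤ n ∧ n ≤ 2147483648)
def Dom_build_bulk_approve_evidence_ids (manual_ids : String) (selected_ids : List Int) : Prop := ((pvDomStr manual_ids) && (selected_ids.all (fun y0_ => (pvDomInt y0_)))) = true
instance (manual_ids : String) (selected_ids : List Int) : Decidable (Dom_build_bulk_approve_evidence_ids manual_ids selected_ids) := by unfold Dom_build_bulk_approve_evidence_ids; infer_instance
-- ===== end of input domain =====

-- ===== PORT A =====
-- B replaces A's interleaved seen-set loops by a reverse overwrite pass recording each value's
-- first-occurrence index, then a sort of those positions (alternative algorithm, no membership test).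
-- s.split(",") never raises for the nonempty separator ",", so PySem.Str.split? is always some; .getD [] is exact here.
def build_bulk_approve_evidence_ids (manual_ids : String) (selected_ids : List Int) : List Int :=
  let s0 :=
    ((PySem.Str.split? manual_ids ",").getD []).foldl
      (fun (st : List Int × PySem.Set Int) raw_value =>
        if PySem.Str.strip raw_value = "" then st
        else
          match PySem.Int.ofStr? (PySem.Str.strip raw_value) with
          | none => st   -- int() raises ValueError here; excluded by Pre_
          | some parsed_id =>
            if PySem.Set.contains st.2 parsed_id then st
            else (st.1 ++ [parsed_id], PySem.Set.add st.2 parsed_id))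
      ([], PySem.Set.empty)
  let s1 :=
    selected_ids.foldl
      (fun (st : List Int × PySem.Set Int) selected_id =>
        if PySem.Set.contains st.2 selected_id then st
        else (st.1 ++ [selected_id], PySem.Set.add st.2 selected_id)) s0
  s1.1

-- ===== PORT B =====
def build_bulk_approve_evidence_ids_alt (manual_ids : String) (selected_ids : List Int) : List Int :=
  let combined :=
    (((PySem.Str.split? manual_ids ",").getD []).filterMap
      (fun tok =>
        if PySem.Str.strip tok = "" then none
        else PySem.Int.ofStr? (PySem.Str.strip tok)))   -- none = int() ValueError; excluded by Pre_
    ++ selected_ids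
  let first_pos :=
    ((PySem.List.enumerate combined).reverse).foldl
      (fun (d : PySem.Dict Int Int) p => d.insert p.2 p.1) PySem.Dict.empty
  (PySem.List.sorted first_pos.items (fun item => item.2)).map (fun item => item.1)

-- ===== PRECONDITION & SPEC =====
-- Pre_ excludes exactly the inputs on which Python A raises ValueError: some comma token whose strip is nonempty but not an int literal.
def Pre_build_bulk_approve_evidence_ids (manual_ids : String) (selected_ids : List Int) : Prop :=
  (((PySem.Str.split? manual_ids ",").getD []).all
    (fun tok => PySem.Str.strip tok == "" || (PySem.Int.ofStr? (PySem.Str.strip tok)).isSome)) = true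
instance (manual_ids : String) (selected_ids : List Int) : Decidable (Pre_build_bulk_approve_evidence_ids manual_ids selected_ids) := by
  unfold Pre_build_bulk_approve_evidence_ids; infer_instance
def pvWitness_build_bulk_approve_evidence_ids : String × List Int := ("1, 2 ,,2", [2, 5])
def Spec_build_bulk_approve_evidence_ids (manual_ids : String) (selected_ids : List Int) (out : List Int) : Prop := out = build_bulk_approve_evidence_ids_alt manual_ids selected_ids
instance (manual_ids : String) (selected_ids : List Int) (out : List Int) : Decidable (Spec_build_bulk_approve_evidence_ids manual_ids selected_ids out) := by unfold Spec_build_bulk_approve_evidence_ids; infer_instance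

-- ===== CLAIM (what is proved, stated in full; the proofs are below) =====
def Claim_equal_build_bulk_approve_evidence_ids : Prop := ∀ (manual_ids : String) (selected_ids : List Int), Dom_build_bulk_approve_evidence_ids manual_ids selected_ids → Pre_build_bulk_approve_evidence_ids manual_ids selected_ids → Spec_build_bulk_approve_evidence_ids manual_ids selected_ids (build_bulk_approve_evidence_ids manual_ids selected_ids)

-- ===== LEMMAS AND PROOFS =====

-- A keeps evidence_ids and seen_ids in lockstep: on a synchronized state both loops advance by PySem.Set.add.
theorem pv_loop2_sync (l : List Int) (ev : List Int) :
    l.foldl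
      (fun (st : List Int × PySem.Set Int) selected_id =>
        if PySem.Set.contains st.2 selected_id then st
        else (st.1 ++ [selected_id], PySem.Set.add st.2 selected_id)) (ev, ev)
    = (l.foldl PySem.Set.add ev, l.foldl PySem.Set.add ev) := by
  induction l generalizing ev with
  | nil => rfl
  | cons x xs ih =>
    rw [List.foldl_cons, List.foldl_cons]
    have hstep : (if PySem.Set.contains ((ev, ev) : List Int × PySem.Set Int).2 x
        then ((ev, ev) : List Int × PySem.Set Int)
        else (((ev, ev) : List Int × PySem.Set Int).1 ++ [x],
          PySem.Set.add ((ev, ev) : List Int × PySem.Set Int).2 x))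
        = ((PySem.Set.add ev x : List Int), (PySem.Set.add ev x : PySem.Set Int)) := by
      by_cases h : x ∈ ev <;> simp [PySem.Set.add, h]
    rw [hstep]
    exact ih (PySem.Set.add ev x)

-- A's first loop on a synchronized state is foldl Set.add over the parsed token list.
theorem pv_loop1_sync (ts : List String) (ev : List Int) :
    ts.foldl
      (fun (st : List Int × PySem.Set Int) raw_value =>
        if PySem.Str.strip raw_value = "" then st
        else
          match PySem.Int.ofStr? (PySem.Str.strip raw_value) with
          | none => st
          | some parsed_id =>
            if PySem.Set.contains st.2 parsed_id then st
            else (st.1 ++ [parsed_id], PySem.Set.add st.2 parsed_id)) (ev, ev)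
    = ((ts.filterMap
          (fun tok =>
            if PySem.Str.strip tok = "" then none
            else PySem.Int.ofStr? (PySem.Str.strip tok))).foldl PySem.Set.add ev,
       (ts.filterMap
          (fun tok =>
            if PySem.Str.strip tok = "" then none
            else PySem.Int.ofStr? (PySem.Str.strip tok))).foldl PySem.Set.add ev) := by
  induction ts generalizing ev with
  | nil => rfl
  | cons t ts ih =>
    rw [List.foldl_cons]
    by_cases he : PySem.Str.strip t = ""
    · have hfm : List.filterMap
          (fun tok => if PySem.Str.strip tok = "" then none
            else PySem.Int.ofStr? (PySem.Str.strip tok)) (t :: ts)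
          = List.filterMap
          (fun tok => if PySem.Str.strip tok = "" then none
            else PySem.Int.ofStr? (PySem.Str.strip tok)) ts := by
        rw [List.filterMap_cons]; simp [he]
      rw [if_pos he, hfm]
      exact ih ev
    · cases hp : PySem.Int.ofStr? (PySem.Str.strip t) with
      | none =>
        have hfm : List.filterMap
            (fun tok => if PySem.Str.strip tok = "" then none
              else PySem.Int.ofStr? (PySem.Str.strip tok)) (t :: ts)
            = List.filterMap
            (fun tok => if PySem.Str.strip tok = "" then none
              else PySem.Int.ofStr? (PySem.Str.strip tok)) ts := by
          rw [List.filterMap_cons]; simp [he, hp]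
        simp only [if_neg he, hp]
        rw [hfm]
        exact ih ev
      | some n =>
        simp only [if_neg he, hp]
        have hstep : (if PySem.Set.contains ((ev, ev) : List Int × PySem.Set Int).2 n
            then ((ev, ev) : List Int × PySem.Set Int)
            else (((ev, ev) : List Int × PySem.Set Int).1 ++ [n],
              PySem.Set.add ((ev, ev) : List Int × PySem.Set Int).2 n))
            = ((PySem.Set.add ev n : List Int), (PySem.Set.add ev n : PySem.Set Int)) := by
          by_cases h : n ∈ ev <;> simp [PySem.Set.add, h]
        have hfm : List.filterMap
            (fun tok => if PySem.Str.strip tok = "" then none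
              else PySem.Int.ofStr? (PySem.Str.strip tok)) (t :: ts)
            = n :: List.filterMap
            (fun tok => if PySem.Str.strip tok = "" then none
              else PySem.Int.ofStr? (PySem.Str.strip tok)) ts := by
          rw [List.filterMap_cons]; simp [he, hp]
        rw [hstep, hfm, List.foldl_cons]
        exact ih (PySem.Set.add ev n)

-- B-side analysis. fp s l = the first-occurrence (value, index) pairs of l indexed from s,
-- in first-occurrence order (so its indices are strictly increasing).
def pvFp (s : Int) : List Int → List (Int × Int)
  | [] => []
  | x :: xs => (x, s) :: (pvFp (s + 1) xs).filter (fun p => decide (p.1 ≠ x))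

theorem pv_discard_eq_filter {s : List Int} {x : Int} :
    PySem.Set.discard s x = s.filter (fun y => decide (y ≠ x)) := by
  simp only [PySem.Set.discard]
  apply List.filter_congr
  intro a _
  by_cases h : a = x <;> simp [h]

theorem pv_map_fst_fp (s : Int) (l : List Int) :
    (pvFp s l).map (fun p => p.1) = PySem.Set.ofList l := by
  induction l generalizing s with
  | nil => rfl
  | cons x xs ih =>
    rw [pvFp, PySem.Set.ofList_cons, List.map_cons]
    congr 1
    rw [show (fun p : Int × Int => decide (p.1 ≠ x))
        = ((fun y => decide (y ≠ x)) ∘ fun p : Int × Int => p.1) from rfl,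
      ← List.filter_map, ih (s + 1), ← pv_discard_eq_filter]

theorem pv_fp_snd_lb (s : Int) (l : List Int) : ∀ p ∈ pvFp s l, s ≤ p.2 := by
  induction l generalizing s with
  | nil => intro p hp; cases hp
  | cons x xs ih =>
    intro p hp
    rw [pvFp] at hp
    rcases List.mem_cons.mp hp with h | h
    · subst h; exact le_refl s
    · have := ih (s + 1) p (List.mem_filter.mp h).1
      omega

theorem pv_fp_pairwise (s : Int) (l : List Int) :
    (pvFp s l).Pairwise (fun a b => a.2 < b.2) := by
  induction l generalizing s with
  | nil => exact List.Pairwise.nil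
  | cons x xs ih =>
    rw [pvFp]
    refine List.pairwise_cons.mpr ⟨?_, List.Pairwise.filter _ (ih (s + 1))⟩
    intro p hp
    have := pv_fp_snd_lb (s + 1) xs p (List.mem_filter.mp hp).1
    omega

-- Folding overwriting inserts of (value, key) pairs: a lookup sees the LAST write, i.e. the
-- first matching pair of the reversed insertion sequence.
theorem pv_get?_foldl_insert (ps : List (Int × Int)) (d : PySem.Dict Int Int) (k : Int) :
    (ps.foldl (fun d p => d.insert p.2 p.1) d).get? k
      = match ps.reverse.find? (fun p => p.2 == k) with
        | some q => some q.1
        | none => d.get? k := by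
  induction ps generalizing d with
  | nil => rfl
  | cons p ps ih =>
    rw [List.foldl_cons, ih, List.reverse_cons, List.find?_append]
    cases hf : ps.reverse.find? (fun p => p.2 == k) with
    | some q => rfl
    | none =>
      simp only [Option.none_or]
      by_cases hk : p.2 = k
      · simp [List.find?, hk, PySem.Dict.get?_insert_self]
      · have hbe : (p.2 == k) = false := by simp [hk]
        simp only [List.find?, hbe, PySem.Dict.get?_insert]
        rw [if_neg (fun h => hk h.symm)]

-- fp s l equals the map of the first-index function over the distinct values of l.
theorem pv_fp_eq_map (l : List Int) (s : Int) :
    pvFp s l = (PySem.Set.ofList l).map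
      (fun x => (x, (((PySem.List.enumerate l s).find? (fun p => p.2 == x)).map (fun p => p.1)).getD 0)) := by
  induction l generalizing s with
  | nil => rfl
  | cons y ys ih =>
    rw [pvFp, PySem.Set.ofList_cons, PySem.List.enumerate_cons, List.map_cons]
    congr 1
    · simp [List.find?]
    · rw [ih (s + 1), pv_discard_eq_filter]
      rw [List.filter_map (f := fun x : Int => (x, (((PySem.List.enumerate ys (s+1)).find? (fun p => p.2 == x)).map (fun p => p.1)).getD 0)) ]
      · apply List.map_congr_left
        intro z hz
        have hzny : z ≠ y := by
          have := (List.mem_filter.mp hz).2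
          simpa using this
        have : (((s, y) : Int × Int).2 == z) = false := by simp [Ne.symm hzny]
        rw [List.find?_cons_of_neg (by simpa using this)]

-- sorted_eq_of_perm_of_pairwise_lt specialised to the port's key (fixes the LT instance for rw).
theorem pv_sorted_eq (xs ys : List (Int × Int)) (h1 : ys.Perm xs)
    (h2 : ys.Pairwise (fun a b => a.2 < b.2)) :
    PySem.List.sorted xs (fun item : Int × Int => item.2) = ys :=
  PySem.List.sorted_eq_of_perm_of_pairwise_lt _ _ _ h1 h2

-- The whole B pipeline on an arbitrary combined list produces its distinct values in order.
theorem pv_main (l : List Int) :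
    (PySem.List.sorted
      (((PySem.List.enumerate l).reverse.foldl
          (fun (d : PySem.Dict Int Int) p => d.insert p.2 p.1) PySem.Dict.empty).items)
      (fun item => item.2)).map (fun item => item.1)
    = PySem.Set.ofList l := by
  set D := (PySem.List.enumerate l).reverse.foldl
      (fun (d : PySem.Dict Int Int) p => d.insert p.2 p.1) PySem.Dict.empty with hD
  have hkeys : D.keys = PySem.Set.ofList l.reverse := by
    rw [hD, PySem.Dict.keys_foldl_insert_key (key := fun p : Int × Int => p.2)]
    rw [List.map_reverse, PySem.List.map_snd_enumerate]
    simp [PySem.Dict.keys_empty, PySem.Set.update_nil_left]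
  have hnd : D.keys.Nodup := by
    rw [hkeys]; exact PySem.Set.nodup_ofList _
  have hget : ∀ k, D.getD k 0
      = (((PySem.List.enumerate l 0).find? (fun p => p.2 == k)).map (fun p => p.1)).getD 0 := by
    intro k
    rw [PySem.Dict.getD_eq_get?_getD, hD, pv_get?_foldl_insert, List.reverse_reverse]
    cases hf : (PySem.List.enumerate l 0).find? (fun p => p.2 == k) with
    | some q => simp
    | none => simp [PySem.Dict.get?_empty]
  have hitems : D.items = (PySem.Set.ofList l.reverse).map
      (fun x => (x, (((PySem.List.enumerate l 0).find? (fun p => p.2 == x)).map (fun p => p.1)).getD 0)) := by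
    rw [PySem.Dict.items_eq_map_keys D hnd 0, hkeys]
    apply List.map_congr_left
    intro x _
    rw [hget x]
  have hperm : (pvFp 0 l).Perm D.items := by
    rw [hitems, pv_fp_eq_map l 0]
    apply List.Perm.map
    apply (List.perm_ext_iff_of_nodup (PySem.Set.nodup_ofList _) (PySem.Set.nodup_ofList _)).mpr
    intro x
    simp [PySem.Set.mem_ofList]
  rw [pv_sorted_eq D.items (pvFp 0 l) hperm (pv_fp_pairwise 0 l)]
  exact pv_map_fst_fp 0 l

-- ===== VERDICT (by name: the statement is the Claim_ definition above) =====
theorem build_bulk_approve_evidence_ids_spec : Claim_equal_build_bulk_approve_evidence_ids := by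
  intro manual_ids selected_ids _ _
  unfold Spec_build_bulk_approve_evidence_ids
  simp only [build_bulk_approve_evidence_ids, build_bulk_approve_evidence_ids_alt]
  rw [show (PySem.Set.empty : PySem.Set Int) = ([] : List Int) from rfl,
    pv_loop1_sync, pv_loop2_sync, pv_main, PySem.Set.ofList_eq_foldl, List.foldl_append]
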